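-- pv_equiv track=rewrite | github.com/pypi-data/pypi-mirror-401 | packages/threshold-onset/threshold_onset-1.0.0-py3-none-any.whl/phase3/phase3.py | _compute_degree_counts
-- ===== SOURCE A (Python) =====
-- def _compute_degree_counts(nodes, edges):
--     """
--     Compute degree counts for each node in graph.
--
--     Degree = number of edges connected to node.
--     Uses exact hash equality.
--
--     Args:
--         nodes: set of node hashes (internal identifiers only)
--         edges: set of edge tuples (hash pairs, internal identifiers only)
--
--     Returns:
--         Dictionary mapping node hash to degree count (int)
--     """
--     degree_counts = {}
--
--     # Initialize all nodes with degree 0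
--     for node in nodes:
--         degree_counts[node] = 0
--
--     # Count edges for each node
--     for edge in edges:
--         hash1, hash2 = edge
--         # Use exact equality for hash comparison
--         if hash1 in nodes:
--             degree_counts[hash1] = degree_counts.get(hash1, 0) + 1
--         if hash2 in nodes:
--             degree_counts[hash2] = degree_counts.get(hash2, 0) + 1
--
--     return degree_counts
-- ===== SOURCE B (Python) =====
-- def _compute_degree_counts(nodes, edges):
--     """See A: degree counts per node. B: flatten endpoints, then count per node."""
--     endpoints = []
--     for edge in edges:
--         hash1, hash2 = edge
--         endpoints.append(hash1)
--         endpoints.append(hash2)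
--     return {node: endpoints.count(node) for node in nodes}
-- ===== Notes on version B (the rewrite author's own statement) =====
-- stated objective: alternative
-- what changed: Replaced the per-edge conditional increment into a pre-initialized dict by building a flat endpoint list once and answering each node with a count over that list (per-node counting instead of per-edge accumulation).
import Mathlib
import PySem

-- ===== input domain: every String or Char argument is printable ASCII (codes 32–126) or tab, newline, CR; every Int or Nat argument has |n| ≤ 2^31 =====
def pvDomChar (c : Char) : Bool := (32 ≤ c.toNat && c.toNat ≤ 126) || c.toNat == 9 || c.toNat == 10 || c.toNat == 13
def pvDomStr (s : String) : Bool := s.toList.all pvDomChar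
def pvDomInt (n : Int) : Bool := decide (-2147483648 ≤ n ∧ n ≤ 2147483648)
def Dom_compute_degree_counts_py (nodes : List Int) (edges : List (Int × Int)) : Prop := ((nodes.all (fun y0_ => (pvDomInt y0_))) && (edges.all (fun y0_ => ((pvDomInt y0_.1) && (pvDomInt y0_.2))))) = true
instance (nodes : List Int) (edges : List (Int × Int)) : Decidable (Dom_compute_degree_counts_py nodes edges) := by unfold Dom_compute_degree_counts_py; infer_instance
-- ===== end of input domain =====

-- ===== PORT A =====
-- A: initialize every node to 0, then for each edge conditionally increment both endpoints.
def compute_degree_counts_py (nodes : List Int) (edges : List (Int × Int)) : List (Int × Int) :=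
  let d0 : PySem.Dict Int Int := nodes.foldl (fun d n => d.insert n 0) PySem.Dict.empty
  let d := edges.foldl (fun d e =>
    let d := if e.1 ∈ nodes then d.insert e.1 (d.getD e.1 0 + 1) else d
    if e.2 ∈ nodes then d.insert e.2 (d.getD e.2 0 + 1) else d) d0
  d.items

-- ===== PORT B =====
-- B: flatten all endpoints into one list, then build the dict by counting each node in it.
def compute_degree_counts_py_alt (nodes : List Int) (edges : List (Int × Int)) : List (Int × Int) :=
  let endpoints : List Int := edges.foldl (fun acc e => acc ++ [e.1, e.2]) []
  (nodes.foldl (fun d n => d.insert n ((endpoints.count n : Int)))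
      (PySem.Dict.empty : PySem.Dict Int Int)).items

-- ===== PRECONDITION & SPEC =====
def Spec_compute_degree_counts_py (nodes : List Int) (edges : List (Int × Int)) (out : List (Int × Int)) : Prop := out = compute_degree_counts_py_alt nodes edges
instance (nodes : List Int) (edges : List (Int × Int)) (out : List (Int × Int)) : Decidable (Spec_compute_degree_counts_py nodes edges out) := by unfold Spec_compute_degree_counts_py; infer_instance

-- ===== CLAIM (what is proved, stated in full; the proofs are below) =====
def Claim_equal_compute_degree_counts_py : Prop := ∀ (nodes : List Int) (edges : List (Int × Int)), Dom_compute_degree_counts_py nodes edges → Spec_compute_degree_counts_py nodes edges (compute_degree_counts_py nodes edges)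


-- ===== LEMMAS AND PROOFS =====

-- one conditional increment of A's loop: keys are unchanged
theorem keys_condInsert (nodes : List Int) (x : Int) (d : PySem.Dict Int Int)
    (hd : ∀ n ∈ nodes, d.contains n = true) :
    ((if x ∈ nodes then d.insert x (d.getD x 0 + 1) else d) : PySem.Dict Int Int).keys = d.keys := by
  by_cases hm : x ∈ nodes
  · rw [if_pos hm]; exact PySem.Dict.keys_insert_of_contains _ _ (hd _ hm)
  · rw [if_neg hm]

-- one conditional increment of A's loop, observed at a key k ∈ nodes
theorem getD_condInsert (nodes : List Int) (x k : Int) (hk : k ∈ nodes) (d : PySem.Dict Int Int) :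
    ((if x ∈ nodes then d.insert x (d.getD x 0 + 1) else d) : PySem.Dict Int Int).getD k 0
      = d.getD k 0 + (if x = k then 1 else 0) := by
  by_cases hm : x ∈ nodes
  · rw [if_pos hm, PySem.Dict.getD_insert]
    by_cases hxk : k = x
    · subst hxk; simp
    · have hxk' : ¬ x = k := fun h => hxk h.symm
      simp [hxk, hxk']
  · rw [if_neg hm]
    have hxk : ¬ x = k := by intro h; exact hm (h ▸ hk)
    simp [hxk]

-- a dict built by inserting a value `c n` for every `n ∈ l` answers getD accordingly
theorem getD_foldl_insert_fun (l : List Int) (c : Int → Int) (k : Int) :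
    ∀ d : PySem.Dict Int Int,
      (l.foldl (fun d n => d.insert n (c n)) d).getD k 0
        = if k ∈ l then c k else d.getD k 0 := by
  induction l with
  | nil => simp
  | cons n l ih =>
    intro d
    simp only [List.foldl_cons, ih, PySem.Dict.getD_insert, List.mem_cons]
    split_ifs with h1 h2 h3 h4 <;> simp_all

-- A's edge loop leaves keys unchanged when every node is already a key
theorem keysA (nodes : List Int) :
    ∀ (es : List (Int × Int)) (d : PySem.Dict Int Int),
      (∀ n ∈ nodes, d.contains n = true) →
      (es.foldl (fun d e =>
        let d := if e.1 ∈ nodes then d.insert e.1 (d.getD e.1 0 + 1) else d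
        if e.2 ∈ nodes then d.insert e.2 (d.getD e.2 0 + 1) else d) d).keys = d.keys := by
  intro es
  induction es with
  | nil => intro d _; rfl
  | cons e es ih =>
    intro d hd
    have hd1 : ∀ n ∈ nodes, ((if e.1 ∈ nodes then d.insert e.1 (d.getD e.1 0 + 1) else d) : PySem.Dict Int Int).contains n = true := by
      intro n hn
      rw [PySem.Dict.contains_eq_decide_mem_keys, keys_condInsert nodes e.1 d hd,
          ← PySem.Dict.contains_eq_decide_mem_keys]
      exact hd n hn
    have stepkeys : ((if e.2 ∈ nodes then
          (if e.1 ∈ nodes then d.insert e.1 (d.getD e.1 0 + 1) else d).insert e.2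
            ((if e.1 ∈ nodes then d.insert e.1 (d.getD e.1 0 + 1) else d).getD e.2 0 + 1)
        else (if e.1 ∈ nodes then d.insert e.1 (d.getD e.1 0 + 1) else d)) : PySem.Dict Int Int).keys = d.keys := by
      rw [keys_condInsert nodes e.2 _ hd1, keys_condInsert nodes e.1 d hd]
    have hd2 : ∀ n ∈ nodes, ((if e.2 ∈ nodes then
          (if e.1 ∈ nodes then d.insert e.1 (d.getD e.1 0 + 1) else d).insert e.2
            ((if e.1 ∈ nodes then d.insert e.1 (d.getD e.1 0 + 1) else d).getD e.2 0 + 1)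
        else (if e.1 ∈ nodes then d.insert e.1 (d.getD e.1 0 + 1) else d)) : PySem.Dict Int Int).contains n = true := by
      intro n hn
      rw [PySem.Dict.contains_eq_decide_mem_keys, stepkeys,
          ← PySem.Dict.contains_eq_decide_mem_keys]
      exact hd n hn
    rw [List.foldl_cons]
    rw [ih _ hd2]
    exact stepkeys

-- A's edge loop adds, at each key k ∈ nodes, the number of endpoint occurrences of k
theorem getDA (nodes : List Int) (k : Int) (hk : k ∈ nodes) :
    ∀ (es : List (Int × Int)) (d : PySem.Dict Int Int),
      (es.foldl (fun d e =>
        let d := if e.1 ∈ nodes then d.insert e.1 (d.getD e.1 0 + 1) else d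
        if e.2 ∈ nodes then d.insert e.2 (d.getD e.2 0 + 1) else d) d).getD k 0
        = d.getD k 0 + ((es.flatMap (fun e => [e.1, e.2])).count k : Int) := by
  intro es
  induction es with
  | nil => intro d; simp
  | cons e es ih =>
    intro d
    rw [List.foldl_cons, ih]
    have hstep : ((if e.2 ∈ nodes then
          (if e.1 ∈ nodes then d.insert e.1 (d.getD e.1 0 + 1) else d).insert e.2
            ((if e.1 ∈ nodes then d.insert e.1 (d.getD e.1 0 + 1) else d).getD e.2 0 + 1)
        else (if e.1 ∈ nodes then d.insert e.1 (d.getD e.1 0 + 1) else d)) : PySem.Dict Int Int).getD k 0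
        = d.getD k 0 + (if e.1 = k then 1 else 0) + (if e.2 = k then 1 else 0) := by
      rw [getD_condInsert nodes e.2 k hk _, getD_condInsert nodes e.1 k hk d]
    rw [hstep]
    simp only [List.flatMap_cons, List.count_append, List.count_cons, List.count_nil]
    have hcast : ∀ b : Int, (if b = k then 1 else 0 : Int) = ((if b == k then 1 else 0 : Nat) : Int) := by
      intro b; by_cases hb : b = k <;> simp [hb]
    rw [hcast e.1, hcast e.2]
    push_cast
    ring

-- building the flat endpoint list by appends is flatMap
theorem endpoints_eq_flatMap (es : List (Int × Int)) :
    es.foldl (fun acc e => acc ++ [e.1, e.2]) [] = es.flatMap (fun e => [e.1, e.2]) := by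
  simpa using PySem.List.foldl_append_eq_flatMap (g := fun e : Int × Int => [e.1, e.2]) (acc := ([] : List Int)) (l := es)

-- ===== VERDICT (by name: the statement is the Claim_ definition above) =====
theorem compute_degree_counts_py_spec : Claim_equal_compute_degree_counts_py := by
  intro nodes edges _
  unfold Spec_compute_degree_counts_py compute_degree_counts_py compute_degree_counts_py_alt
  simp only []
  set d0 : PySem.Dict Int Int := nodes.foldl (fun d n => d.insert n 0) PySem.Dict.empty with hd0
  have hkeys0 : d0.keys = PySem.Set.ofList nodes := by
    rw [hd0, PySem.Dict.keys_foldl_insert]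
    simp [PySem.Dict.keys_empty, PySem.Set.update_nil_left]
  have hnodup0 : d0.keys.Nodup := by
    rw [hkeys0]; exact PySem.Set.nodup_ofList nodes
  have hcont0 : ∀ n ∈ nodes, d0.contains n = true := by
    intro n hn
    rw [PySem.Dict.contains_eq_decide_mem_keys, hkeys0]
    simpa [PySem.Set.mem_ofList] using hn
  set dA := edges.foldl (fun d e =>
    let d := if e.1 ∈ nodes then d.insert e.1 (d.getD e.1 0 + 1) else d
    if e.2 ∈ nodes then d.insert e.2 (d.getD e.2 0 + 1) else d) d0 with hdA
  set ep : List Int := edges.foldl (fun acc e => acc ++ [e.1, e.2]) [] with hep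
  set dB := nodes.foldl (fun d n => d.insert n ((ep.count n : Int))) (PySem.Dict.empty : PySem.Dict Int Int) with hdB
  have hkeysA : dA.keys = PySem.Set.ofList nodes := by
    rw [hdA, keysA nodes edges d0 hcont0, hkeys0]
  have hkeysB : dB.keys = PySem.Set.ofList nodes := by
    rw [hdB, PySem.Dict.keys_foldl_insert]
    simp [PySem.Dict.keys_empty, PySem.Set.update_nil_left]
  have hnodupA : dA.keys.Nodup := by rw [hkeysA]; exact PySem.Set.nodup_ofList nodes
  have hnodupB : dB.keys.Nodup := by rw [hkeysB]; exact PySem.Set.nodup_ofList nodes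
  rw [PySem.Dict.items_eq_map_keys dA hnodupA 0, PySem.Dict.items_eq_map_keys dB hnodupB 0,
      hkeysA, hkeysB]
  apply List.map_congr_left
  intro k hkset
  have hk : k ∈ nodes := (PySem.Set.mem_ofList nodes k).mp hkset
  have hA : dA.getD k 0 = (ep.count k : Int) := by
    rw [hdA, getDA nodes k hk edges d0, hep, endpoints_eq_flatMap]
    have : d0.getD k 0 = 0 := by
      rw [hd0]
      have := getD_foldl_insert_fun nodes (fun _ => 0) k PySem.Dict.empty
      simp only [this]
      rw [if_pos hk]
    rw [this]; ring
  have hB : dB.getD k 0 = (ep.count k : Int) := by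
    rw [hdB, getD_foldl_insert_fun nodes (fun n => (ep.count n : Int)) k, if_pos hk]
  rw [hA, hB]
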